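-- pv_equiv track=rewrite | github.com/photogbill/Athena-Prototype | function.py | _extract_uncertainties
-- ===== SOURCE A (Python) =====
-- from typing import List, Dict, Tuple, Optional, Any, Union
--
-- def _extract_uncertainties(response: str) -> List[str]:
--     """Extract expressions of uncertainty"""
--     uncertainties = []
--
--     uncertainty_phrases = [
--         "uncertain", "not sure", "unclear", "ambiguous",
--         "possibly", "might be", "could be", "hard to say",
--         "difficult to determine", "open question", "debatable"
--     ]
--
--     response_lower = response.lower()
--     for phrase in uncertainty_phrases:
--         if phrase in response_lower:
--             # Find the sentence containing uncertainty
--             sentences = response.split('.')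
--             for sentence in sentences:
--                 if phrase in sentence.lower():
--                     uncertainties.append(sentence.strip())
--                     break
--
--     return uncertainties[:3]  # Limit to 3 uncertainties
-- ===== SOURCE B (Python) =====
-- def _extract_uncertainties(response):
--     """Extract expressions of uncertainty: filter the phrases actually present,
--     then a single pass over the sentences fills a phrase -> sentence table."""
--     uncertainty_phrases = [
--         "uncertain", "not sure", "unclear", "ambiguous",
--         "possibly", "might be", "could be", "hard to say",
--         "difficult to determine", "open question", "debatable"
--     ]
--     low_full = response.lower()
--     present = [p for p in uncertainty_phrases if p in low_full]
--     found = {}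
--     for sentence in response.split('.'):
--         low = sentence.lower()
--         for p in present:
--             if p not in found and p in low:
--                 found[p] = sentence.strip()
--     return [found[p] for p in present if p in found][:3]
-- ===== Notes on version B (the rewrite author's own statement) =====
-- stated objective: alternative
-- what changed: Instead of re-splitting the response and rescanning all sentences once per phrase, B filters the phrase list against the lowered response once, then makes a single pass over the sentences filling a phrase-to-first-sentence dictionary, and reads the results off in phrase order.
import Mathlib
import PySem

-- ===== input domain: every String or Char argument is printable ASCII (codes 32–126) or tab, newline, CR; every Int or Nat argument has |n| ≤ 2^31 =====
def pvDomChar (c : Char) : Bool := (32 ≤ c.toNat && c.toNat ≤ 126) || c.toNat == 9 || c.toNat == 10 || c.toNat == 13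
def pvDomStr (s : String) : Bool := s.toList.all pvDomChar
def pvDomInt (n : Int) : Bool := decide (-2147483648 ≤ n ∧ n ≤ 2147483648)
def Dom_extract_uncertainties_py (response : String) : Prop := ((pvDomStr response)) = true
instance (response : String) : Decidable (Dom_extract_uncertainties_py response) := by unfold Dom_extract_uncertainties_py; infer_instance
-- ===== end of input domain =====

-- B replaces A's per-phrase re-split-and-rescan by one phrase pre-filter plus a single pass
-- over the sentences filling a phrase -> first-matching-sentence dictionary (objective: alternative).

-- ===== PORT A =====
def pvUncPhrases : List String :=
  ["uncertain", "not sure", "unclear", "ambiguous",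
   "possibly", "might be", "could be", "hard to say",
   "difficult to determine", "open question", "debatable"]

-- response.split('.') ; the separator is the nonempty literal ".", so split? is always `some`
def pvSplitDot (s : String) : List String := (PySem.Str.split? s ".").getD []

-- A's inner `for sentence in sentences: if phrase in sentence.lower(): append(sentence.strip()); break`
def pvInnerA (phrase : String) : List String → Option String
  | [] => none
  | s :: rest =>
      if PySem.Str.isIn phrase (PySem.Str.lower s) then some (PySem.Str.strip s)
      else pvInnerA phrase rest

def extract_uncertainties_py (response : String) : List String :=
  let response_lower := PySem.Str.lower response
  let uncertainties := pvUncPhrases.foldl (fun acc phrase =>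
    if PySem.Str.isIn phrase response_lower then
      match pvInnerA phrase (pvSplitDot response) with
      | some st => acc ++ [st]
      | none => acc
    else acc) []
  uncertainties.take 3

-- ===== PORT B =====
def extract_uncertainties_py_alt (response : String) : List String :=
  let low_full := PySem.Str.lower response
  let present := pvUncPhrases.filter (fun p => PySem.Str.isIn p low_full)
  let found := (pvSplitDot response).foldl (fun d sentence =>
      let low := PySem.Str.lower sentence
      present.foldl (fun d p =>
        if !(PySem.Dict.contains d p) && PySem.Str.isIn p low then
          PySem.Dict.insert d p (PySem.Str.strip sentence)
        else d) d)
    PySem.Dict.empty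
  (present.filterMap (fun p => PySem.Dict.get? found p)).take 3

-- ===== PRECONDITION & SPEC =====
def Spec_extract_uncertainties_py (response : String) (out : List String) : Prop := out = extract_uncertainties_py_alt response
instance (response : String) (out : List String) : Decidable (Spec_extract_uncertainties_py response out) := by unfold Spec_extract_uncertainties_py; infer_instance

-- ===== CLAIM (what is proved, stated in full; the proofs are below) =====
def Claim_equal_extract_uncertainties_py : Prop := ∀ (response : String), Dom_extract_uncertainties_py response → Spec_extract_uncertainties_py response (extract_uncertainties_py response)

-- ===== LEMMAS AND PROOFS =====

-- the value B would store for sentence s and phrase p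
def pvMatchVal (s p : String) : Option String :=
  if PySem.Str.isIn p (PySem.Str.lower s) then some (PySem.Str.strip s) else none

-- A's inner loop is "first sentence whose lowering contains the phrase, stripped"
theorem pvInnerA_eq_findSome? (p : String) (ss : List String) :
    pvInnerA p ss = ss.findSome? (fun s => pvMatchVal s p) := by
  induction ss with
  | nil => rfl
  | cons s rest ih =>
      rw [List.findSome?_cons]
      by_cases h : PySem.Str.isIn p (PySem.Str.lower s) = true
      · rw [show pvMatchVal s p = some (PySem.Str.strip s) from by
          unfold pvMatchVal; rw [if_pos h]]
        show (if PySem.Str.isIn p (PySem.Str.lower s) = true then some (PySem.Str.strip s)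
          else pvInnerA p rest) = some (PySem.Str.strip s)
        rw [if_pos h]
      · rw [show pvMatchVal s p = none from by unfold pvMatchVal; rw [if_neg h]]
        show (if PySem.Str.isIn p (PySem.Str.lower s) = true then some (PySem.Str.strip s)
          else pvInnerA p rest) = rest.findSome? fun s => pvMatchVal s p
        rw [if_neg h, ih]

-- B's inner loop over the phrase list: one sentence updates the dictionary pointwise
theorem pvInnerB_get? (L : List String) (s : String) (d : PySem.Dict String String) (p : String) :
    (L.foldl (fun d q =>
        if !(PySem.Dict.contains d q) && PySem.Str.isIn q (PySem.Str.lower s) then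
          PySem.Dict.insert d q (PySem.Str.strip s)
        else d) d).get? p
      = if p ∈ L then (d.get? p).or (pvMatchVal s p) else d.get? p := by
  induction L generalizing d with
  | nil => simp
  | cons q rest ih =>
      rw [List.foldl_cons, ih]
      by_cases hqp : p = q
      · subst hqp
        rcases hd : d.get? p with _ | v
        · have hc : d.contains p = false := by
            rw [PySem.Dict.contains_eq_isSome_get?, hd]; rfl
          by_cases hin : PySem.Str.isIn p (PySem.Str.lower s) = true
          · have hcond : (!d.contains p && PySem.Str.isIn p (PySem.Str.lower s)) = true := by
              rw [hc, hin]; rfl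
            have hstep : (if !d.contains p && PySem.Str.isIn p (PySem.Str.lower s) then
                d.insert p (PySem.Str.strip s) else d).get? p = some (PySem.Str.strip s) := by
              rw [if_pos hcond, PySem.Dict.get?_insert_self]
            have hmv : pvMatchVal s p = some (PySem.Str.strip s) := by
              unfold pvMatchVal; rw [if_pos hin]
            rw [hstep]
            simp [hmv]
          · have hcond : ¬((!d.contains p && PySem.Str.isIn p (PySem.Str.lower s)) = true) := by
              simp only [hc, Bool.not_false, Bool.true_and]; exact hin
            have hstep : (if !d.contains p && PySem.Str.isIn p (PySem.Str.lower s) then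
                d.insert p (PySem.Str.strip s) else d).get? p = d.get? p := by
              rw [if_neg hcond]
            have hmv : pvMatchVal s p = none := by unfold pvMatchVal; rw [if_neg hin]
            rw [hstep]
            simp [hd, hmv]
        · have hc : d.contains p = true := by
            rw [PySem.Dict.contains_eq_isSome_get?, hd]; rfl
          have hstep : (if !d.contains p && PySem.Str.isIn p (PySem.Str.lower s) then
              d.insert p (PySem.Str.strip s) else d).get? p = d.get? p := by
            rw [if_neg (by rw [hc]; simp)]
          rw [hstep]
          simp [hd]
      · have hstep : (if !d.contains q && PySem.Str.isIn q (PySem.Str.lower s) then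
            d.insert q (PySem.Str.strip s) else d).get? p = d.get? p := by
          split
          · exact PySem.Dict.get?_insert_of_ne d _ hqp
          · rfl
        rw [hstep]
        simp [List.mem_cons, hqp]

-- B's outer loop over the sentences
theorem pvOuterB_get? (L : List String) (ss : List String) (d : PySem.Dict String String) (p : String) :
    (ss.foldl (fun d sentence =>
        L.foldl (fun d q =>
          if !(PySem.Dict.contains d q) && PySem.Str.isIn q (PySem.Str.lower sentence) then
            PySem.Dict.insert d q (PySem.Str.strip sentence)
          else d) d) d).get? p
      = if p ∈ L then (d.get? p).or (ss.findSome? (fun s => pvMatchVal s p)) else d.get? p := by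
  induction ss generalizing d with
  | nil => simp
  | cons s rest ih =>
      simp only [List.foldl_cons, ih, pvInnerB_get?, List.findSome?_cons]
      by_cases hp : p ∈ L
      · simp only [hp, if_true]
        rcases pvMatchVal s p with _ | v <;> simp
      · simp [hp]

-- A's outer loop appends at most one sentence per phrase
theorem pvAFold (c : String → Bool) (m : String → Option String) (L : List String) (acc : List String) :
    L.foldl (fun acc phrase =>
        if c phrase then
          match m phrase with
          | some st => acc ++ [st]
          | none => acc
        else acc) acc
      = acc ++ L.filterMap (fun p => if c p then m p else none) := by
  induction L generalizing acc with
  | nil => simp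
  | cons q rest ih =>
      simp only [List.foldl_cons, List.filterMap_cons]
      by_cases hc : c q = true
      · rcases hm : m q with _ | st <;> simp [hc, ih]
      · simp [hc, ih]

-- ===== VERDICT (by name: the statement is the Claim_ definition above) =====
theorem extract_uncertainties_py_spec : Claim_equal_extract_uncertainties_py := by
  intro response _
  unfold Spec_extract_uncertainties_py extract_uncertainties_py extract_uncertainties_py_alt
  have hB : (pvUncPhrases.filter (fun p => PySem.Str.isIn p (PySem.Str.lower response))).filterMap
        (fun p => ((pvSplitDot response).foldl (fun d sentence =>
            (pvUncPhrases.filter (fun p => PySem.Str.isIn p (PySem.Str.lower response))).foldl (fun d q =>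
              if !(PySem.Dict.contains d q) && PySem.Str.isIn q (PySem.Str.lower sentence) then
                PySem.Dict.insert d q (PySem.Str.strip sentence)
              else d) d) PySem.Dict.empty).get? p)
      = (pvUncPhrases.filter (fun p => PySem.Str.isIn p (PySem.Str.lower response))).filterMap
        (fun p => pvInnerA p (pvSplitDot response)) := by
    apply List.filterMap_congr
    intro p hp
    rw [pvOuterB_get?, if_pos hp, PySem.Dict.get?_empty, Option.none_or,
      pvInnerA_eq_findSome?]
  simp only []
  rw [hB, pvAFold, List.filterMap_filter, List.nil_append]
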